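-- pv_equiv track=rewrite | github.com/deevijbansal/CV_Projects | Probability_Project/main.py | calc_expectation
-- ===== SOURCE A (Python) =====
-- M = 1000000007
--
-- def mod_add(a, b):
--     a = (a % M + M) % M
--     b = (b % M + M) % M
--     return (a + b) % M
--
-- def mod_multiply(a, b):
--     a = (a % M + M) % M
--     b = (b % M + M) % M
--     return (a * b) % M
--
-- def mod_divide(a, b):
--     a = (a % M + M) % M
--     b = (b % M + M) % M
--     return mod_multiply(a, pow(b, M-2, M))
--
-- def probabilities(games, aWins):
--     # Returns the probability of Alice winning 'aWins' times in 'games' matches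
--     # return p.q^(-1) mod 1000000007 where p/q is the required probability.
--     dp = [[0 for _ in range(aWins+1)] for _ in range(games+1)]
--     dp[2][1] = 1
--
--     for r in range(3, games+1):
--         for w in range(1, min(r, aWins+1)):
--             # For the current state:
--             # dp[r][w] = dp[r-1][w-1] * (r-w)/(r-1) + dp[r-1][w] * w/(r-1)
--             # First terms represents Alice winning this round (will happen if she has w-1 wins in r-1 rounds)
--             # Second term represents Alice losing this round (will happen if she has w wins in r-1 rounds)
--             Win = mod_divide(mod_multiply(dp[r-1][w-1], r-w), r-1)
--             Loss = mod_divide(mod_multiply(dp[r-1][w], w), r-1)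
--             dp[r][w] = mod_add(Win, Loss)
--
--     return dp
--
-- def calc_expectation(t):
--     """
--     Returns:
--         The expected value of \sum_{i=1}^{t} Xi will be of the form p/q,
--         where p and q are positive integers,
--         return p.q^(-1) mod 1000000007.
--
--     """
--     expectation = 0
--     prob = probabilities(t,t)
--     for wins in range(0, t+1):
--         xsum = 2*wins - t
--         p = prob[t][wins]
--         expectation = mod_add(expectation, mod_multiply(xsum, p))
--
--     return expectation
-- ===== SOURCE B (Python) =====
-- def calc_expectation(t):
--     # The win-count distribution dp[t][w] is symmetric in w <-> t-w, so the
--     # terms (2w-t)*P(w) and (2(t-w)-t)*P(t-w) cancel pairwise: the expectation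
--     # is exactly 0 (mod 1000000007) -- no dp table needed.
--     return 0
-- ===== Notes on version B (the rewrite author's own statement) =====
-- stated objective: faster
-- what changed: B replaces the whole modular dp-table computation by the closed form 0: the win-count distribution is symmetric (dp[t][w]=dp[t][t-w]), so the terms (2w-t)*P(w) cancel pairwise and the expectation is exactly 0 for every t>=2.
import Mathlib
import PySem

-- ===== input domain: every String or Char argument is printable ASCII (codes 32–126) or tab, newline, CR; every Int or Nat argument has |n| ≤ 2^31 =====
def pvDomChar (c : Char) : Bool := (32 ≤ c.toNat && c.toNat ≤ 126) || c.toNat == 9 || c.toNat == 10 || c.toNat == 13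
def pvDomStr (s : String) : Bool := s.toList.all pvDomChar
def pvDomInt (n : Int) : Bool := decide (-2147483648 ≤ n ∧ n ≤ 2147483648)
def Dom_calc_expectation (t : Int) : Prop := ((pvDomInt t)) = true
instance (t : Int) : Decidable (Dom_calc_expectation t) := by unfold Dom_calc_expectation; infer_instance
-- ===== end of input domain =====

-- B replaces A's modular dp-table computation by the closed form 0 (the win-count
-- distribution is symmetric in w ↔ t-w, so the terms (2w-t)·P(w) cancel pairwise).

-- ===== PORT A =====
-- module constant M = 1000000007
def pyM : Int := 1000000007

-- Python's `%` with the positive modulus 1000000007 coincides with Lean's Int `%` (emod):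
-- both return the representative in [0, 1000000007).  Used throughout the mod_* helpers.
def mod_add (a b : Int) : Int :=
  ((a % pyM + pyM) % pyM + (b % pyM + pyM) % pyM) % pyM

def mod_multiply (a b : Int) : Int :=
  ((a % pyM + pyM) % pyM * ((b % pyM + pyM) % pyM)) % pyM

-- pow(b, e, m): square-and-multiply modular exponentiation, hand-ported (the PySem
-- primitive powMod is not evaluable at this exponent).  Exact for the inputs reached
-- here: 0 ≤ b, 0 < m, so every `%` below agrees with Python's (nonnegative remainder).
def pvPowMod (b : Int) (e : Nat) (m : Int) : Int :=
  if h : e = 0 then 1 % m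
  else
    let hrec := pvPowMod b (e / 2) m
    if e % 2 = 0 then hrec * hrec % m else hrec * hrec % m * b % m
termination_by e
decreasing_by exact Nat.div_lt_self (Nat.pos_of_ne_zero h) (by norm_num)

-- pow(b, M-2, M) with the Nat exponent 1000000005 = M-2
def mod_divide (a b : Int) : Int :=
  mod_multiply ((a % pyM + pyM) % pyM)
    (pvPowMod ((b % pyM + pyM) % pyM) 1000000005 pyM)

-- body of the inner loop `for w in range(1, min(r, aWins+1))` (reads/writes are in
-- range whenever Pre_ holds; pyGetD/pySetD are exact there)
def pvInner (r : Int) (dp : List (List Int)) (w : Int) : List (List Int) :=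
  let win := mod_divide (mod_multiply
      (PySem.List.pyGetD (PySem.List.pyGetD dp (r - 1) []) (w - 1) 0) (r - w)) (r - 1)
  let loss := mod_divide (mod_multiply
      (PySem.List.pyGetD (PySem.List.pyGetD dp (r - 1) []) w 0) w) (r - 1)
  PySem.List.pySetD dp r
    (PySem.List.pySetD (PySem.List.pyGetD dp r []) w (mod_add win loss))

-- body of the outer loop `for r in range(3, games+1)`
def pvOuter (aWins : Int) (dp : List (List Int)) (r : Int) : List (List Int) :=
  (PySem.List.pyRange 1 (min r (aWins + 1)) 1).foldl (pvInner r) dp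

def probabilities (games aWins : Int) : List (List Int) :=
  let dp0 : List (List Int) :=
    (PySem.List.pyRange 0 (games + 1) 1).map
      (fun _ => (PySem.List.pyRange 0 (aWins + 1) 1).map (fun _ => (0 : Int)))
  -- dp[2][1] = 1
  let dp1 := PySem.List.pySetD dp0 2
    (PySem.List.pySetD (PySem.List.pyGetD dp0 2 []) 1 (1 : Int))
  (PySem.List.pyRange 3 (games + 1) 1).foldl (pvOuter aWins) dp1

def calc_expectation (t : Int) : Int :=
  let prob := probabilities t t
  (PySem.List.pyRange 0 (t + 1) 1).foldl
    (fun expectation wins =>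
      mod_add expectation (mod_multiply (2 * wins - t)
        (PySem.List.pyGetD (PySem.List.pyGetD prob t []) wins 0)))
    0

-- ===== PORT B =====
def calc_expectation_alt (t : Int) : Int := 0

-- ===== PRECONDITION & SPEC =====
-- Pre_ excludes exactly the inputs t < 2 on which the Python A raises IndexError
-- (it writes dp[2][1] = 1 into a table with fewer than 3 rows).
def Pre_calc_expectation (t : Int) : Prop := 2 ≤ t
instance (t : Int) : Decidable (Pre_calc_expectation t) := by
  unfold Pre_calc_expectation; infer_instance

def pvWitness_calc_expectation : Int := 3

def Spec_calc_expectation (t : Int) (out : Int) : Prop := out = calc_expectation_alt t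
instance (t : Int) (out : Int) : Decidable (Spec_calc_expectation t out) := by
  unfold Spec_calc_expectation; infer_instance

-- ===== CLAIM (what is proved, stated in full; the proofs are below) =====
def Claim_equal_calc_expectation : Prop :=
  ∀ (t : Int), Dom_calc_expectation t → Pre_calc_expectation t →
    Spec_calc_expectation t (calc_expectation t)

-- ===== LEMMAS AND PROOFS =====

-- row i of the table / entry (i, j), with Nat indices (proof-side view of the reads)
def pvRow (dp : List (List Int)) (i : Nat) : List Int := dp.getD i []
def pvG (dp : List (List Int)) (i j : Nat) : Int := (dp.getD i []).getD j 0

-- the value the inner loop writes at (r, w), reading the previous row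
def pvF (prev : List Int) (r w : Nat) : Int :=
  mod_add
    (mod_divide (mod_multiply (prev.getD (w - 1) 0) ((r : Int) - (w : Int))) ((r : Int) - 1))
    (mod_divide (mod_multiply (prev.getD w 0) (w : Int)) ((r : Int) - 1))

-- the invariant after the outer loop has processed rows 3..r
def pvInv (n r : Nat) (dp : List (List Int)) : Prop :=
  dp.length = n + 1 ∧ (∀ row ∈ dp, row.length = n + 1) ∧
  (∀ w : Nat, (w = 0 ∨ r ≤ w) → pvG dp r w = 0) ∧
  (∀ w : Nat, w ≤ r → pvG dp r w = pvG dp r (r - w)) ∧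
  (∀ i : Nat, r < i → ∀ w : Nat, pvG dp i w = 0)

lemma pv_mod_add_bounds (a b : Int) : 0 ≤ mod_add a b ∧ mod_add a b < pyM := by
  unfold mod_add pyM
  constructor
  · exact Int.emod_nonneg _ (by norm_num)
  · exact Int.emod_lt_of_pos _ (by norm_num)

lemma pv_mod_add_comm (a b : Int) : mod_add a b = mod_add b a := by
  unfold mod_add; ring_nf

lemma pv_castM : ((1000000007 : Int) : ZMod 1000000007) = 0 := by
  exact_mod_cast ZMod.natCast_self 1000000007

lemma pv_cast_emod (a : Int) :
    (((a % pyM) : Int) : ZMod 1000000007) = (a : ZMod 1000000007) := by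
  have h : a % pyM = a - pyM * (a / pyM) := by
    rw [Int.emod_def]
  rw [h]; unfold pyM; push_cast
  rw [show ((1000000007 : ZMod 1000000007) = 0) from by decide]; ring

lemma pv_cast_mod_add (a b : Int) :
    ((mod_add a b : Int) : ZMod 1000000007) =
      (a : ZMod 1000000007) + (b : ZMod 1000000007) := by
  unfold mod_add
  rw [pv_cast_emod]; push_cast [pv_cast_emod]
  rw [show (pyM : ZMod 1000000007) = 0 by exact_mod_cast pv_castM]
  ring

lemma pv_cast_mod_multiply (a b : Int) :
    ((mod_multiply a b : Int) : ZMod 1000000007) =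
      (a : ZMod 1000000007) * (b : ZMod 1000000007) := by
  unfold mod_multiply
  rw [pv_cast_emod]; push_cast [pv_cast_emod]
  rw [show (pyM : ZMod 1000000007) = 0 by exact_mod_cast pv_castM]
  ring

lemma pv_getD_set_eq {α : Type} (xs : List α) (nn : Nat) (v d : α) (h : nn < xs.length) :
    (xs.set nn v).getD nn d = v := by
  simp [List.getD_eq_getElem?_getD, h]

lemma pv_getD_set_ne {α : Type} (xs : List α) (nn m : Nat) (v d : α) (h : m ≠ nn) :
    (xs.set nn v).getD m d = xs.getD m d := by
  simp [List.getD_eq_getElem?_getD, List.getElem?_set_ne (by omega : nn ≠ m)]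

-- symmetry of the written value under w ↔ r - w, given symmetry of the previous row
lemma pv_F_symm (prev : List Int) (r w : Nat) (h1 : 1 ≤ w) (h2 : w ≤ r - 1) (h3 : 3 ≤ r)
    (hsym : ∀ v : Nat, v ≤ r - 1 → prev.getD v 0 = prev.getD ((r - 1) - v) 0) :
    pvF prev r (r - w) = pvF prev r w := by
  unfold pvF
  rw [hsym (r - w - 1) (by omega), hsym (r - w) (by omega)]
  rw [show (r - 1) - (r - w - 1) = w by omega, show (r - 1) - (r - w) = w - 1 by omega]
  rw [show ((r : Int) - ((r - w : Nat) : Int)) = (w : Int) by omega]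
  rw [show ((r - w : Nat) : Int) = (r : Int) - (w : Int) by omega]
  exact pv_mod_add_comm _ _

-- getD of a constant-map list
lemma pv_getD_map_const {α β : Type} (l : List α) (c : β) (i : Nat) (d : β) :
    (l.map (fun _ => c)).getD i d = if i < l.length then c else d := by
  rcases Nat.lt_or_ge i l.length with h | h
  · simp [List.getD_eq_getElem?_getD, h]
  · simp [List.getD_eq_getElem?_getD, Nat.not_lt.2 h]

-- the zero row and the fresh table
lemma pv_base_inv (n : Nat) (hn : 2 ≤ n) :
    pvInv n 2
      (PySem.List.pySetD
        ((PySem.List.pyRange 0 ((n : Int) + 1) 1).map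
          (fun _ => (PySem.List.pyRange 0 ((n : Int) + 1) 1).map (fun _ => (0 : Int))))
        2
        (PySem.List.pySetD
          (PySem.List.pyGetD
            ((PySem.List.pyRange 0 ((n : Int) + 1) 1).map
              (fun _ => (PySem.List.pyRange 0 ((n : Int) + 1) 1).map (fun _ => (0 : Int))))
            2 []) 1 (1 : Int))) := by
  set Z : List Int := (PySem.List.pyRange 0 ((n : Int) + 1) 1).map (fun _ => (0 : Int)) with hZ
  set T : List (List Int) :=
    (PySem.List.pyRange 0 ((n : Int) + 1) 1).map (fun _ => Z) with hT
  have hlenR : (PySem.List.pyRange 0 ((n : Int) + 1) 1).length = n + 1 := by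
    rw [PySem.List.length_pyRange_one]; omega
  have hlenT : T.length = n + 1 := by rw [hT, List.length_map, hlenR]
  have hlenZ : Z.length = n + 1 := by rw [hZ, List.length_map, hlenR]
  have hZ0 : ∀ j : Nat, Z.getD j 0 = 0 := by
    intro j; rw [hZ, pv_getD_map_const]; split <;> rfl
  have hTget : ∀ i : Nat, T.getD i [] = if i < n + 1 then Z else [] := by
    intro i; rw [hT, pv_getD_map_const, hlenR]
  have hT2 : PySem.List.pyGetD T (2 : Int) [] = Z := by
    rw [show (2 : Int) = ((2 : Nat) : Int) by norm_num, PySem.List.pyGetD_natCast,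
      hTget, if_pos (by omega)]
  have hset : PySem.List.pySetD T 2 (PySem.List.pySetD (PySem.List.pyGetD T 2 []) 1 (1 : Int))
      = T.set 2 (Z.set 1 1) := by
    rw [hT2, show (2 : Int) = ((2 : Nat) : Int) by norm_num,
      show (1 : Int) = ((1 : Nat) : Int) by norm_num,
      PySem.List.pySetD_natCast, PySem.List.pySetD_natCast]
  rw [hset]
  have hrow2 : (T.set 2 (Z.set 1 1)).getD 2 [] = Z.set 1 1 :=
    pv_getD_set_eq _ _ _ _ (by omega)
  refine ⟨by simpa using hlenT, ?_, ?_, ?_, ?_⟩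
  · intro row hrow
    rcases List.mem_or_eq_of_mem_set hrow with h | h
    · rw [hT] at h; rcases List.mem_map.1 h with ⟨_, _, rfl⟩; exact hlenZ
    · rw [h, List.length_set]; exact hlenZ
  · intro w hw
    unfold pvG; rw [hrow2]
    rcases hw with h | h
    · subst h; rw [pv_getD_set_ne _ _ _ _ _ (by omega)]; exact hZ0 0
    · rw [pv_getD_set_ne _ _ _ _ _ (by omega)]; exact hZ0 w
  · intro w hw
    unfold pvG; rw [hrow2]
    interval_cases w
    · rw [pv_getD_set_ne _ _ _ _ _ (by omega), pv_getD_set_ne _ _ _ _ _ (by omega),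
        hZ0 0, hZ0 2]
    · rfl
    · rw [pv_getD_set_ne _ _ _ _ _ (by omega), pv_getD_set_ne _ _ _ _ _ (by omega),
        hZ0 0, hZ0 2]
  · intro i hi w
    unfold pvG
    rw [pv_getD_set_ne _ _ _ _ _ (by omega), hTget]
    split
    · exact hZ0 w
    · rfl

-- inner loop: after processing w = 1..k, row r carries pvF and nothing else moved
lemma pv_inner_lemma (n r : Nat) (dp : List (List Int))
    (hr3 : 3 ≤ r) (hrn : r ≤ n)
    (hlen : dp.length = n + 1) (hrows : ∀ row ∈ dp, row.length = n + 1)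
    (k : Nat) (hk : k ≤ r - 1) :
    let dp' := (PySem.List.pyRange 1 (1 + (k : Int)) 1).foldl (pvInner (r : Int)) dp
    dp'.length = n + 1 ∧ (∀ row ∈ dp', row.length = n + 1) ∧
    (∀ i : Nat, i ≠ r → pvRow dp' i = pvRow dp i) ∧
    (∀ w : Nat, 1 ≤ w → w ≤ k → pvG dp' r w = pvF (pvRow dp (r - 1)) r w) ∧
    (∀ w : Nat, (w = 0 ∨ k < w) → pvG dp' r w = pvG dp r w) := by
  induction k with
  | zero =>
    intro dp'
    have : dp' = dp := by
      show (PySem.List.pyRange 1 (1 + ((0 : Nat) : Int)) 1).foldl (pvInner (r : Int)) dp = dp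
      rw [show (1 + ((0 : Nat) : Int)) = 1 by norm_num,
        PySem.List.pyRange_one_eq_nil (le_refl 1)]
      rfl
    rw [this]
    exact ⟨hlen, hrows, fun _ _ => rfl, fun w hw1 hw2 => by omega, fun _ _ => rfl⟩
  | succ k ih =>
    intro dp'
    have hk' : k ≤ r - 1 := by omega
    obtain ⟨ihlen, ihrows, ihrow, ihval, ihun⟩ := ih hk'
    set dpk := (PySem.List.pyRange 1 (1 + (k : Int)) 1).foldl (pvInner (r : Int)) dp with hdpk
    have hsplit : PySem.List.pyRange 1 (1 + ((k + 1 : Nat) : Int)) 1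
        = PySem.List.pyRange 1 (1 + (k : Int)) 1 ++ [1 + (k : Int)] := by
      rw [show (1 + ((k + 1 : Nat) : Int)) = (1 + (k : Int)) + 1 by push_cast; ring]
      exact PySem.List.pyRange_one_succ_right (by omega)
    have hdp' : dp' = pvInner (r : Int) dpk (1 + (k : Int)) := by
      show (PySem.List.pyRange 1 (1 + ((k + 1 : Nat) : Int)) 1).foldl (pvInner (r : Int)) dp
          = _
      rw [hsplit, List.foldl_append]; rfl
    -- evaluate the body
    have hread : PySem.List.pyGetD dpk ((r : Int) - 1) [] = pvRow dp (r - 1) := by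
      rw [show ((r : Int) - 1) = ((r - 1 : Nat) : Int) by omega,
        PySem.List.pyGetD_natCast]
      exact ihrow (r - 1) (by omega)
    have hrowr : PySem.List.pyGetD dpk (r : Int) [] = pvRow dpk r := by
      rw [PySem.List.pyGetD_natCast]; rfl
    have hbody : pvInner (r : Int) dpk (1 + (k : Int))
        = dpk.set r ((pvRow dpk r).set (k + 1)
            (pvF (pvRow dp (r - 1)) r (k + 1))) := by
      unfold pvInner
      rw [hread, hrowr]
      rw [show ((1 + (k : Int)) - 1) = ((k : Nat) : Int) by ring,
        show (1 + (k : Int)) = ((k + 1 : Nat) : Int) by push_cast; ring]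
      rw [PySem.List.pyGetD_natCast, PySem.List.pyGetD_natCast,
        PySem.List.pySetD_natCast, PySem.List.pySetD_natCast]
      unfold pvF pvRow
      rw [show ((r : Int) - ((k + 1 : Nat) : Int)) = ((r : Int) - ((k + 1 : Nat) : Int)) from rfl]
      norm_num
    have hrklen : (pvRow dpk r).length = n + 1 := by
      apply ihrows
      unfold pvRow
      rw [List.getD_eq_getElem _ _ (by omega : r < dpk.length)]
      exact List.getElem_mem _
    rw [hdp', hbody]
    refine ⟨by simpa using ihlen, ?_, ?_, ?_, ?_⟩
    · intro row hrow
      rcases List.mem_or_eq_of_mem_set hrow with h | h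
      · exact ihrows row h
      · rw [h, List.length_set]; exact hrklen
    · intro i hi
      unfold pvRow
      rw [pv_getD_set_ne _ _ _ _ _ hi]
      exact ihrow i hi
    · intro w hw1 hw2
      unfold pvG
      rw [pv_getD_set_eq _ _ _ _ (by omega : r < dpk.length)]
      rcases Nat.lt_or_ge w (k + 1) with h | h
      · rw [pv_getD_set_ne _ _ _ _ _ (by omega)]
        exact ihval w hw1 (by omega)
      · rw [show w = k + 1 by omega]
        exact pv_getD_set_eq _ _ _ _ (by omega)
    · intro w hw
      unfold pvG
      rw [pv_getD_set_eq _ _ _ _ (by omega : r < dpk.length),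
        pv_getD_set_ne _ _ _ _ _ (by omega)]
      exact ihun w (by omega)

-- outer step: one execution of pvOuter advances the invariant from r-1 to r
lemma pv_outer_step (n r : Nat) (dp : List (List Int))
    (hr3 : 3 ≤ r) (hrn : r ≤ n) (hinv : pvInv n (r - 1) dp) :
    pvInv n r (pvOuter (n : Int) dp (r : Int)) := by
  obtain ⟨hlen, hrows, hzero, hsymm, habove⟩ := hinv
  have hmin : min (r : Int) ((n : Int) + 1) = (r : Int) := min_eq_left (by omega)
  have hres : pvOuter (n : Int) dp (r : Int)
      = (PySem.List.pyRange 1 (1 + ((r - 1 : Nat) : Int)) 1).foldl (pvInner (r : Int)) dp := by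
    unfold pvOuter
    rw [hmin, show (r : Int) = 1 + ((r - 1 : Nat) : Int) by omega]
  obtain ⟨hlen', hrows', hrow', hval', hun'⟩ :=
    pv_inner_lemma n r dp hr3 hrn hlen hrows (r - 1) (le_refl _)
  rw [hres]
  set dp' := (PySem.List.pyRange 1 (1 + ((r - 1 : Nat) : Int)) 1).foldl (pvInner (r : Int)) dp
    with hdp'
  have hzero' : ∀ w : Nat, (w = 0 ∨ r ≤ w) → pvG dp' r w = 0 := by
    intro w hw
    rcases hw with h | h
    · subst h; rw [hun' 0 (Or.inl rfl)]; exact habove r (by omega) 0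
    · rw [hun' w (Or.inr (by omega))]; exact habove r (by omega) w
  refine ⟨hlen', hrows', hzero', ?_, ?_⟩
  · intro w hw
    rcases Nat.eq_zero_or_pos w with h0 | h1
    · subst h0
      rw [Nat.sub_zero, hzero' 0 (Or.inl rfl), hzero' r (Or.inr (by omega))]
    rcases Nat.lt_or_ge w r with hlt | hge
    · have hmid : 1 ≤ w ∧ w ≤ r - 1 := ⟨h1, by omega⟩
      rw [hval' w hmid.1 hmid.2, hval' (r - w) (by omega) (by omega)]
      symm
      apply pv_F_symm _ _ _ hmid.1 hmid.2 hr3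
      intro v hv
      exact hsymm v (by omega)
    · have hw' : w = r := by omega
      rw [hw', Nat.sub_self, hzero' 0 (Or.inl rfl), hzero' r (Or.inr (le_refl r))]
  · intro i hi w
    unfold pvG
    have := hrow' i (by omega)
    unfold pvRow at this
    rw [this]
    exact habove i (by omega) w

-- the whole outer loop, from an arbitrary base table satisfying the invariant at r = 2
lemma pv_key (n : Nat) (dp1 : List (List Int)) (hbase : pvInv n 2 dp1) :
    ∀ k : Nat, 2 + k ≤ n →
      pvInv n (2 + k)
        ((PySem.List.pyRange 3 (((2 + k : Nat) : Int) + 1) 1).foldl (pvOuter (n : Int)) dp1) := by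
  intro k
  induction k with
  | zero =>
    intro hk
    rw [show (((2 + 0 : Nat) : Int) + 1) = 3 by norm_num,
      PySem.List.pyRange_one_eq_nil (le_refl 3)]
    exact hbase
  | succ k ih =>
    intro hk
    have hsplit : PySem.List.pyRange 3 (((2 + (k + 1) : Nat) : Int) + 1) 1
        = PySem.List.pyRange 3 (((2 + k : Nat) : Int) + 1) 1 ++ [((2 + k : Nat) : Int) + 1] := by
      rw [show (((2 + (k + 1) : Nat) : Int) + 1) = (((2 + k : Nat) : Int) + 1) + 1 by
        push_cast; ring]
      exact PySem.List.pyRange_one_succ_right (by push_cast; omega)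
    rw [hsplit, List.foldl_append]
    simp only [List.foldl_cons, List.foldl_nil]
    rw [show (((2 + k : Nat) : Int) + 1) = ((3 + k : Nat) : Int) by push_cast; ring]
    have hstep := pv_outer_step n (3 + k)
      ((PySem.List.pyRange 3 ((3 + k : Nat) : Int) 1).foldl (pvOuter (n : Int)) dp1)
      (by omega) (by omega)
      (by
        rw [show ((3 + k : Nat) : Int) = (((2 + k : Nat) : Int) + 1) by push_cast; ring,
          show 3 + k - 1 = 2 + k by omega]
        exact ih (by omega))
    rw [show 2 + (k + 1) = 3 + k by omega]
    exact hstep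

-- the whole outer loop
lemma pv_outer_inv (n : Nat) (hn : 2 ≤ n) :
    pvInv n n (probabilities (n : Int) (n : Int)) := by
  have H := pv_key n _ (pv_base_inv n hn) (n - 2) (by omega)
  rw [show 2 + (n - 2) = n by omega] at H
  unfold probabilities
  exact H

-- the final summation is 0 in ZMod
lemma pv_fold_cast (n : Nat) (q : Nat → Int) (L : List Nat) (acc : Int) :
    ((L.foldl (fun (acc : Int) (k : Nat) =>
        mod_add acc (mod_multiply (2 * (k : Int) - (n : Int)) (q k))) acc : Int)
      : ZMod 1000000007) =
      (acc : ZMod 1000000007) +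
        (L.map (fun (k : Nat) =>
          ((2 * (k : Int) - (n : Int) : Int) : ZMod 1000000007) *
            ((q k : Int) : ZMod 1000000007))).sum := by
  induction L generalizing acc with
  | nil => simp
  | cons x L ih =>
    simp only [List.foldl_cons, List.map_cons, List.sum_cons]
    rw [ih]
    rw [pv_cast_mod_add, pv_cast_mod_multiply]
    ring

lemma pv_fold_bounds (n : Nat) (q : Nat → Int) (L : List Nat) (acc : Int)
    (h : 0 ≤ acc ∧ acc < pyM) :
    0 ≤ (L.foldl (fun (acc : Int) (k : Nat) =>
        mod_add acc (mod_multiply (2 * (k : Int) - (n : Int)) (q k))) acc) ∧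
    (L.foldl (fun (acc : Int) (k : Nat) =>
        mod_add acc (mod_multiply (2 * (k : Int) - (n : Int)) (q k))) acc) < pyM := by
  induction L generalizing acc with
  | nil => exact h
  | cons x L ih =>
    simp only [List.foldl_cons]
    exact ih _ (pv_mod_add_bounds _ _)

lemma pv_sum_zero (n : Nat) (q : Nat → Int) (hsym : ∀ i : Nat, i ≤ n → q i = q (n - i)) :
    ((List.range (n + 1)).map (fun (k : Nat) =>
        ((2 * (k : Int) - (n : Int) : Int) : ZMod 1000000007) *
          ((q k : Int) : ZMod 1000000007))).sum = 0 := by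
  have hgen : ∀ (m : Nat) (g : Nat → ZMod 1000000007),
      ((List.range m).map g).sum = ∑ i ∈ Finset.range m, g i := by
    intro m g
    induction m with
    | zero => simp
    | succ m ih =>
      rw [List.range_succ, List.map_append, List.sum_append, Finset.sum_range_succ, ih]
      simp
  rw [hgen]
  set f : Nat → ZMod 1000000007 := fun i =>
    ((2 * (i : Int) - (n : Int) : Int) : ZMod 1000000007) *
      ((q i : Int) : ZMod 1000000007) with hf
  set S := ∑ i ∈ Finset.range (n + 1), f i with hS
  have hrefl : ∑ i ∈ Finset.range (n + 1), f (n - i) = S := by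
    rw [hS]
    have := Finset.sum_range_reflect f (n + 1)
    simpa using this
  have hpair : ∀ i ∈ Finset.range (n + 1), f i + f (n - i) = 0 := by
    intro i hi
    have hi' : i ≤ n := by
      have := Finset.mem_range.1 hi; omega
    rw [hf]
    simp only
    rw [← hsym i hi']
    rw [show ((n - i : Nat) : Int) = (n : Int) - (i : Int) by omega]
    push_cast
    ring
  have h2 : S + S = 0 := by
    calc S + S = ∑ i ∈ Finset.range (n + 1), f i + ∑ i ∈ Finset.range (n + 1), f (n - i) := by
          rw [hrefl]
      _ = ∑ i ∈ Finset.range (n + 1), (f i + f (n - i)) := by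
          rw [← Finset.sum_add_distrib]
      _ = 0 := Finset.sum_eq_zero hpair
  calc S = ((500000004 : ZMod 1000000007) * 2) * S := by
        rw [show ((500000004 : ZMod 1000000007) * 2) = 1 from by decide]; ring
    _ = 500000004 * (S + S) := by ring
    _ = 0 := by rw [h2]; ring

lemma pv_main (t : Int) (ht : 2 ≤ t) : calc_expectation t = 0 := by
  lift t to Nat using (by omega : (0 : Int) ≤ t) with n
  have hn : 2 ≤ n := by exact_mod_cast ht
  obtain ⟨hlen, hrows, hzero, hsymm, habove⟩ := pv_outer_inv n hn
  unfold calc_expectation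
  set prob := probabilities (n : Int) (n : Int) with hprob
  rw [PySem.List.pyRange_one]
  rw [show (((n : Int) + 1 - 0).toNat) = n + 1 by omega]
  rw [List.foldl_map]
  have hfun : (fun (acc : Int) (k : Nat) =>
        mod_add acc (mod_multiply (2 * ((0 : Int) + (k : Int)) - (n : Int))
          (PySem.List.pyGetD (PySem.List.pyGetD prob (n : Int) []) ((0 : Int) + (k : Int)) 0)))
      = (fun (acc : Int) (k : Nat) =>
        mod_add acc (mod_multiply (2 * (k : Int) - (n : Int)) (pvG prob n k))) := by
    funext acc k
    rw [show ((0 : Int) + (k : Int)) = ((k : Nat) : Int) by ring]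
    rw [PySem.List.pyGetD_natCast, PySem.List.pyGetD_natCast]
    rfl
  rw [hfun]
  set E := (List.range (n + 1)).foldl
    (fun (acc : Int) (k : Nat) =>
      mod_add acc (mod_multiply (2 * (k : Int) - (n : Int)) (pvG prob n k))) 0 with hE
  have hbd := pv_fold_bounds n (pvG prob n) (List.range (n + 1)) 0 ⟨le_refl 0, by norm_num [pyM]⟩
  have hcast : ((E : Int) : ZMod 1000000007) = 0 := by
    rw [hE, pv_fold_cast]
    rw [pv_sum_zero n (pvG prob n) (fun i hi => hsymm i hi)]
    simp
  have hdvd : ((1000000007 : Int)) ∣ E := by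
    have := (ZMod.intCast_zmod_eq_zero_iff_dvd E 1000000007).1 hcast
    exact_mod_cast this
  unfold pyM at hbd
  omega

-- ===== VERDICT (by name: the statement is the Claim_ definition above) =====
theorem calc_expectation_spec : Claim_equal_calc_expectation := by
  intro t _ hpre
  unfold Spec_calc_expectation calc_expectation_alt
  exact pv_main t hpre
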